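-- pv_equiv track=rewrite | github.com/AkhilVinod-ai/Topology_Simulation | topology.py | build_paths_to_victim
-- ===== SOURCE A (Python) =====
-- from collections import deque
-- from typing import Dict, Iterable, List, Set, Tuple
--
-- NodeId = str
--
-- Adjacency = Dict[NodeId, Set[NodeId]]
--
-- def bfs_parent_tree(adj: Adjacency, root: NodeId) -> tuple[Dict[NodeId, NodeId | None], Dict[NodeId, int]]:
--     """Build BFS parent and hop distance maps from root."""
--     if root not in adj:
--         raise ValueError(f"Root node {root} not in topology")
--
--     parent: Dict[NodeId, NodeId | None] = {root: None}
--     dist: Dict[NodeId, int] = {root: 0}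
--     q: deque[NodeId] = deque([root])
--
--     while q:
--         u = q.popleft()
--         for v in adj[u]:
--             if v in dist:
--                 continue
--             dist[v] = dist[u] + 1
--             parent[v] = u
--             q.append(v)
--
--     return parent, dist
--
-- def path_to_root(parent: Dict[NodeId, NodeId | None], node: NodeId) -> List[NodeId]:
--     """Return [node, ..., root] from parent mapping."""
--     if node not in parent:
--         raise ValueError(f"Node {node} missing from parent tree")
--
--     path: List[NodeId] = []
--     cur: NodeId | None = node
--     while cur is not None:
--         path.append(cur)
--         cur = parent[cur]
--     return path
--
-- def build_paths_to_victim(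
--     adj: Adjacency,
--     victim: NodeId,
--     sources: Iterable[NodeId],
-- ) -> Dict[NodeId, List[NodeId]]:
--     """Build path [source, ..., victim] for each source."""
--     parent, _ = bfs_parent_tree(adj, victim)
--     paths: Dict[NodeId, List[NodeId]] = {}
--     for src in sources:
--         path = path_to_root(parent, src)
--         if path[-1] != victim:
--             raise ValueError(f"Source {src} not connected to victim {victim}")
--         paths[src] = path
--     return paths
-- ===== SOURCE B (Python) =====
-- from collections import deque
--
-- def build_paths_to_victim(adj, victim, sources):
--     """One BFS from victim that stores the full path [node, ..., victim] for
--     each discovered node, so no separate parent-tracing pass is needed."""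
--     if victim not in adj:
--         raise ValueError(f"Root node {victim} not in topology")
--     path_map = {victim: [victim]}
--     q = deque([victim])
--     while q:
--         u = q.popleft()
--         for v in adj[u]:
--             if v in path_map:
--                 continue
--             path_map[v] = [v] + path_map[u]
--             q.append(v)
--     paths = {}
--     for src in sources:
--         if src not in path_map:
--             raise ValueError(f"Source {src} not connected to victim {victim}")
--         paths[src] = path_map[src]
--     return paths
-- ===== Notes on version B (the rewrite author's own statement) =====
-- stated objective: simpler
-- what changed: B runs a single BFS from the victim that stores the full path [node,...,victim] for every discovered node (path_map[v] = [v] + path_map[u]), then just looks each source up, eliminating A's separate parent map, distance map and per-source parent-chain tracing loop (and the dead path[-1] != victim branch).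
import Mathlib
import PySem

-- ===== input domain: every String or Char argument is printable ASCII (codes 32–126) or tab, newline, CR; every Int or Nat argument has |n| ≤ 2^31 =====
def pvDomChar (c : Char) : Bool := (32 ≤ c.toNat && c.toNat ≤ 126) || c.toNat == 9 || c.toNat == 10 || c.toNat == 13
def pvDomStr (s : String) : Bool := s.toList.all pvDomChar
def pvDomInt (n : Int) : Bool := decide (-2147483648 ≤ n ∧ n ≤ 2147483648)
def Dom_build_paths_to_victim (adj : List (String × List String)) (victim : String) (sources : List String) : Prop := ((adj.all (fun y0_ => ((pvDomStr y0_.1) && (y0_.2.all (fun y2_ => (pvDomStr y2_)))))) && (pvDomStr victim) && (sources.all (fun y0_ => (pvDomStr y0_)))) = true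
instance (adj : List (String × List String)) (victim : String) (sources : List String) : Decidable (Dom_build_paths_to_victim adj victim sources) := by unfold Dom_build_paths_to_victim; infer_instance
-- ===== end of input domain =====

-- B replaces A's parent/dist maps + per-source parent-chain tracing by one BFS that
-- stores the full path [node,...,victim] for each discovered node (objective: simpler).

-- ===== PORT A =====
-- neighbours adj[u]; inside the BFS u is always a key under Pre_, so the default [] is never used there
def pvNbrs (adj : List (String × List String)) (u : String) : List String :=
  PySem.Dict.getD (PySem.Dict.ofList adj) u []

-- upper bound on BFS iterations (each iteration pops one queue element; total enqueues ≤ 1 + Σ|adj[u]|)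
def pvFuel (adj : List (String × List String)) : Nat :=
  1 + adj.foldl (fun a p => a + p.2.length) 0

-- body of A's inner 'for v in adj[u]' loop over the state (parent, dist, q)
def pvStepA (u : String)
    (st : PySem.Dict String (Option String) × PySem.Dict String Int × List String) (v : String) :
    PySem.Dict String (Option String) × PySem.Dict String Int × List String :=
  if (PySem.Dict.get? st.2.1 v).isSome then st
  else (st.1.insert v (some u), st.2.1.insert v (st.2.1.getD u 0 + 1), st.2.2 ++ [v])

-- A's 'while q:' loop (fuel-bounded; pvFuel is sufficient on Pre_)
def pvBfsA (adj : List (String × List String)) :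
    Nat → PySem.Dict String (Option String) × PySem.Dict String Int × List String →
    PySem.Dict String (Option String) × PySem.Dict String Int
  | 0, st => (st.1, st.2.1)
  | Nat.succ fuel, st =>
    match st.2.2 with
    | [] => (st.1, st.2.1)
    | u :: q => pvBfsA adj fuel ((pvNbrs adj u).foldl (pvStepA u) (st.1, st.2.1, q))

-- path_to_root's 'while cur is not None' loop (parent[cur] via getD; fuel = parent.size suffices for a BFS tree)
def pvTrace (parent : PySem.Dict String (Option String)) :
    Nat → Option String → List String → List String
  | 0, _, acc => acc
  | _+1, none, acc => acc
  | Nat.succ f, some c, acc => pvTrace parent f (parent.getD c none) (acc ++ [c])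

-- path_to_root; 'none' = Python's ValueError (excluded by Pre_)
def pvPathToRoot (parent : PySem.Dict String (Option String)) (node : String) : Option (List String) :=
  if (parent.get? node).isSome then some (pvTrace parent parent.size (some node) []) else none

def build_paths_to_victim (adj : List (String × List String)) (victim : String) (sources : List String) : List (String × List String) :=
  if (PySem.Dict.get? (PySem.Dict.ofList adj) victim).isSome then
    let st := pvBfsA adj (pvFuel adj)
        ((PySem.Dict.empty : PySem.Dict String (Option String)).insert victim none,
         (PySem.Dict.empty : PySem.Dict String Int).insert victim 0, [victim])
    (sources.foldl (fun (paths : PySem.Dict String (List String)) src =>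
      match pvPathToRoot st.1 src with
      | none => paths            -- Python raises ValueError here (outside Pre_)
      | some path =>
        if path.getLast? ≠ some victim then paths   -- Python raises here; dead inside Pre_
        else paths.insert src path) PySem.Dict.empty).items
  else []                        -- Python raises ValueError here (outside Pre_)

-- ===== PORT B =====
-- body of B's inner loop over the state (path_map, q)
def pvStepB (u : String)
    (st : PySem.Dict String (List String) × List String) (v : String) :
    PySem.Dict String (List String) × List String :=
  if (PySem.Dict.get? st.1 v).isSome then st
  else (st.1.insert v (v :: st.1.getD u []), st.2 ++ [v])

-- B's 'while q:' loop
def pvBfsB (adj : List (String × List String)) :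
    Nat → PySem.Dict String (List String) × List String → PySem.Dict String (List String)
  | 0, st => st.1
  | Nat.succ fuel, st =>
    match st.2 with
    | [] => st.1
    | u :: q => pvBfsB adj fuel ((pvNbrs adj u).foldl (pvStepB u) (st.1, q))

def build_paths_to_victim_alt (adj : List (String × List String)) (victim : String) (sources : List String) : List (String × List String) :=
  if (PySem.Dict.get? (PySem.Dict.ofList adj) victim).isSome then
    let pm := pvBfsB adj (pvFuel adj)
        ((PySem.Dict.empty : PySem.Dict String (List String)).insert victim [victim], [victim])
    (sources.foldl (fun (paths : PySem.Dict String (List String)) src =>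
      match PySem.Dict.get? pm src with
      | none => paths            -- Python raises ValueError here (outside Pre_)
      | some path => paths.insert src path) PySem.Dict.empty).items
  else []                        -- Python raises ValueError here (outside Pre_)

-- ===== PRECONDITION & SPEC =====
-- Pre-side saturation (independent of the ports' BFS): nodes reachable from victim
def pvPreClose (adj : List (String × List String)) (s : List String) : List String :=
  s.foldl (fun acc u =>
    (PySem.Dict.getD (PySem.Dict.ofList adj) u []).foldl
      (fun acc v => if v ∈ acc then acc else acc ++ [v]) acc) s

def pvReach (adj : List (String × List String)) (victim : String) : List String :=
  (pvPreClose adj)^[1 + adj.foldl (fun a p => a + p.2.length) 0] [victim]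

-- Exactly where Python A returns normally: victim is a key, every node reachable from
-- victim is a key (else bfs_parent_tree hits a KeyError), and every source is reachable
-- from victim (else path_to_root raises ValueError).
def Pre_build_paths_to_victim (adj : List (String × List String)) (victim : String) (sources : List String) : Prop :=
  (PySem.Dict.ofList adj).contains victim = true ∧
  (∀ u ∈ pvReach adj victim, (PySem.Dict.ofList adj).contains u = true) ∧
  (∀ s ∈ sources, s ∈ pvReach adj victim)
instance (adj : List (String × List String)) (victim : String) (sources : List String) : Decidable (Pre_build_paths_to_victim adj victim sources) := by unfold Pre_build_paths_to_victim; infer_instance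

def pvWitness_build_paths_to_victim : (List (String × List String)) × String × List String :=
  ([("v", ["a"]), ("a", [])], "v", ["a"])

def Spec_build_paths_to_victim (adj : List (String × List String)) (victim : String) (sources : List String) (out : List (String × List String)) : Prop := out = build_paths_to_victim_alt adj victim sources
instance (adj : List (String × List String)) (victim : String) (sources : List String) (out : List (String × List String)) : Decidable (Spec_build_paths_to_victim adj victim sources out) := by unfold Spec_build_paths_to_victim; infer_instance

-- ===== CLAIM (what is proved, stated in full; the proofs are below) =====
def Claim_equal_build_paths_to_victim : Prop := ∀ (adj : List (String × List String)) (victim : String) (sources : List String), Dom_build_paths_to_victim adj victim sources → Pre_build_paths_to_victim adj victim sources → Spec_build_paths_to_victim adj victim sources (build_paths_to_victim adj victim sources)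

-- ===== LEMMAS AND PROOFS =====

-- relation between an entry of B's path_map and A's parent map
def pvPathOk (victim : String) (parent : PySem.Dict String (Option String))
    (pm : PySem.Dict String (List String)) (v : String) (p : List String) : Prop :=
  p.length ≤ pm.size ∧
  match parent.get? v with
  | some none => v = victim ∧ p = [v]
  | some (some u) => ∃ pu, pm.get? u = some pu ∧ p = v :: pu
  | none => False

-- the loop invariant tying A's (parent, dist) to B's path_map
def pvInvR (victim : String) (parent : PySem.Dict String (Option String))
    (dist : PySem.Dict String Int) (pm : PySem.Dict String (List String)) : Prop :=
  (∀ v, (dist.get? v).isSome ↔ (pm.get? v).isSome) ∧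
  (∀ v, (parent.get? v).isSome ↔ (pm.get? v).isSome) ∧
  parent.size = pm.size ∧
  (∀ v p, pm.get? v = some p → pvPathOk victim parent pm v p)

theorem pathOk_ne_nil {victim parent pm v p} (h : pvPathOk victim parent pm v p) : p ≠ [] := by
  obtain ⟨-, h⟩ := h
  cases hv : parent.get? v with
  | none => rw [hv] at h; exact h.elim
  | some o =>
    cases o with
    | none => rw [hv] at h; rw [h.2]; simp
    | some u => rw [hv] at h; obtain ⟨pu, -, hp⟩ := h; rw [hp]; simp

theorem trace_none (parent : PySem.Dict String (Option String)) (f : Nat) (acc : List String) :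
    pvTrace parent f none acc = acc := by
  cases f <;> rfl

theorem trace_eq {victim parent dist pm} (hInv : pvInvR victim parent dist pm) :
    ∀ (fuel : Nat) (v : String) (p acc : List String),
      pm.get? v = some p → p.length ≤ fuel →
      pvTrace parent fuel (some v) acc = acc ++ p := by
  intro fuel
  induction fuel with
  | zero =>
    intro v p acc hv hl
    exact absurd (List.eq_nil_of_length_eq_zero (Nat.le_zero.mp hl))
      (pathOk_ne_nil (hInv.2.2.2 v p hv))
  | succ f ih =>
    intro v p acc hv hl
    have hok := hInv.2.2.2 v p hv
    obtain ⟨-, hok⟩ := hok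
    show pvTrace parent f (parent.getD v none) (acc ++ [v]) = acc ++ p
    cases hpv : parent.get? v with
    | none => rw [hpv] at hok; exact hok.elim
    | some o =>
      have hgd : parent.getD v none = o := PySem.Dict.getD_of_get?_eq_some parent none hpv
      cases o with
      | none =>
        rw [hpv] at hok
        rw [hgd, trace_none, hok.2]
      | some u =>
        rw [hpv] at hok
        obtain ⟨pu, hu, hp⟩ := hok
        rw [hgd, ih u pu (acc ++ [v]) hu (by rw [hp] at hl; simpa using Nat.lt_succ_iff.mp hl)]
        simp [hp]

theorem last_victim {victim parent dist pm} (hInv : pvInvR victim parent dist pm) :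
    ∀ (n : Nat) (p : List String) (v : String), p.length ≤ n → pm.get? v = some p →
      p.getLast? = some victim := by
  intro n
  induction n with
  | zero =>
    intro p v hl hv
    exact absurd (List.eq_nil_of_length_eq_zero (Nat.le_zero.mp hl))
      (pathOk_ne_nil (hInv.2.2.2 v p hv))
  | succ n ih =>
    intro p v hl hv
    have hok := hInv.2.2.2 v p hv
    obtain ⟨-, hok⟩ := hok
    cases hpv : parent.get? v with
    | none => rw [hpv] at hok; exact hok.elim
    | some o =>
      cases o with
      | none => rw [hpv] at hok; rw [hok.2, hok.1]; rfl
      | some u =>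
        rw [hpv] at hok
        obtain ⟨pu, hu, hp⟩ := hok
        have hpu : pu.getLast? = some victim :=
          ih pu u (by rw [hp] at hl; simpa using Nat.lt_succ_iff.mp hl) hu
        cases pu with
        | nil => exact absurd rfl (pathOk_ne_nil (hInv.2.2.2 u [] hu))
        | cons b l =>
          rw [hp, List.getLast?_cons_cons]
          exact hpu

theorem size_insert_fresh {ν : Type} (d : PySem.Dict String ν) (k : String) (w : ν)
    (h : d.get? k = none) : (d.insert k w).size = d.size + 1 := by
  have hc : d.contains k = false := by
    rw [PySem.Dict.contains_eq_isSome_get?, h]; rfl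
  show (d.insert k w).items.length = d.items.length + 1
  rw [PySem.Dict.items_insert_of_not_contains _ _ hc]
  simp

theorem fold_pres {victim : String} (u : String) (ns : List String) :
    ∀ (parent : PySem.Dict String (Option String)) (dist : PySem.Dict String Int)
      (pm : PySem.Dict String (List String)) (q : List String),
      pvInvR victim parent dist pm → (pm.get? u).isSome → (∀ x ∈ q, (pm.get? x).isSome) →
      (pvInvR victim (ns.foldl (pvStepA u) (parent, dist, q)).1
        (ns.foldl (pvStepA u) (parent, dist, q)).2.1
        (ns.foldl (pvStepB u) (pm, q)).1) ∧
      (ns.foldl (pvStepA u) (parent, dist, q)).2.2 = (ns.foldl (pvStepB u) (pm, q)).2 ∧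
      (∀ x ∈ (ns.foldl (pvStepB u) (pm, q)).2, ((ns.foldl (pvStepB u) (pm, q)).1.get? x).isSome) ∧
      ((ns.foldl (pvStepB u) (pm, q)).1.get? u).isSome := by
  induction ns with
  | nil =>
    intro parent dist pm q hInv hu hq
    exact ⟨hInv, rfl, hq, hu⟩
  | cons v ns ih =>
    intro parent dist pm q hInv hu hq
    simp only [List.foldl_cons]
    by_cases hv : (pm.get? v).isSome
    · have hA : pvStepA u (parent, dist, q) v = (parent, dist, q) := by
        unfold pvStepA; simp only []; rw [if_pos (by simpa using (hInv.1 v).mpr hv)]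
      have hB : pvStepB u (pm, q) v = (pm, q) := by
        unfold pvStepB; simp only []; rw [if_pos (by simpa using hv)]
      rw [hA, hB]; exact ih parent dist pm q hInv hu hq
    · have hdv : dist.get? v = none := by
        have := (hInv.1 v); simp [Option.isSome_iff_ne_none] at this hv ⊢; tauto
      have hpv : parent.get? v = none := by
        have := (hInv.2.1 v); simp [Option.isSome_iff_ne_none] at this hv ⊢; tauto
      have hpmv : pm.get? v = none := by
        simpa [Option.isSome_iff_ne_none] using hv
      obtain ⟨pu, hpu⟩ := Option.isSome_iff_exists.mp hu
      have huv : u ≠ v := fun h => by rw [h, hpmv] at hpu; cases hpu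
      have hA : pvStepA u (parent, dist, q) v
          = (parent.insert v (some u), dist.insert v (dist.getD u 0 + 1), q ++ [v]) := by
        unfold pvStepA; simp only []; rw [if_neg (by simp [hdv])]
      have hB : pvStepB u (pm, q) v = (pm.insert v (v :: pm.getD u []), q ++ [v]) := by
        unfold pvStepB; simp only []; rw [if_neg (by simp [hpmv])]
      rw [hA, hB]
      set parent' := parent.insert v (some u) with hparent'
      set pm' := pm.insert v (v :: pm.getD u []) with hpm'
      have hgetpm' : ∀ x, pm'.get? x = if x = v then some (v :: pm.getD u []) else pm.get? x :=
        fun x => PySem.Dict.get?_insert pm v x _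
      have hgetparent' : ∀ x, parent'.get? x = if x = v then some (some u) else parent.get? x :=
        fun x => PySem.Dict.get?_insert parent v x _
      have hsize : pm'.size = pm.size + 1 := size_insert_fresh pm v _ hpmv
      have hsizeP : parent'.size = parent.size + 1 := size_insert_fresh parent v _ hpv
      have hgdu : pm.getD u [] = pu := PySem.Dict.getD_of_get?_eq_some pm [] hpu
      have hInv' : pvInvR victim parent' (dist.insert v (dist.getD u 0 + 1)) pm' := by
        refine ⟨?_, ?_, ?_, ?_⟩
        · intro x
          rw [hgetpm', PySem.Dict.get?_insert dist v x _]
          by_cases hx : x = v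
          · simp [hx]
          · simp only [if_neg hx]; exact hInv.1 x
        · intro x
          rw [hgetpm', hgetparent']
          by_cases hx : x = v
          · simp [hx]
          · simp only [if_neg hx]; exact hInv.2.1 x
        · rw [hsize, hsizeP, hInv.2.2.1]
        · intro x p hx
          rw [hgetpm'] at hx
          by_cases hxv : x = v
          · rw [if_pos hxv, hgdu] at hx
            have hp : p = v :: pu := (Option.some.inj hx).symm
            have hpulen : pu.length ≤ pm.size := (hInv.2.2.2 u pu hpu).1
            refine ⟨by rw [hp, hsize]; simp; omega, ?_⟩
            rw [hgetparent', if_pos hxv]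
            exact ⟨pu, by rw [hgetpm', if_neg huv]; exact hpu, by rw [hp, hxv]⟩
          · rw [if_neg hxv] at hx
            have hok := hInv.2.2.2 x p hx
            refine ⟨le_trans hok.1 (by rw [hsize]; omega), ?_⟩
            rw [hgetparent', if_neg hxv]
            obtain ⟨-, hok2⟩ := hok
            cases hpx : parent.get? x with
            | none => rw [hpx] at hok2; exact hok2.elim
            | some o =>
              cases o with
              | none => rw [hpx] at hok2; exact hok2
              | some w =>
                rw [hpx] at hok2
                obtain ⟨pw, hw, hp⟩ := hok2
                have hwv : w ≠ v := fun h => by rw [h, hpmv] at hw; cases hw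
                exact ⟨pw, by rw [hgetpm', if_neg hwv]; exact hw, hp⟩
      have hq' : ∀ x ∈ q ++ [v], (pm'.get? x).isSome := by
        intro x hxm
        rw [hgetpm']
        by_cases hx : x = v
        · simp [hx]
        · rw [if_neg hx]
          rcases List.mem_append.mp hxm with h | h
          · exact hq x h
          · simp at h; exact absurd h hx
      have hu' : (pm'.get? u).isSome := by rw [hgetpm', if_neg huv]; exact hu
      exact ih parent' (dist.insert v (dist.getD u 0 + 1)) pm' (q ++ [v]) hInv' hu' hq'

theorem bfs_pres {victim : String} (adj : List (String × List String)) :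
    ∀ (fuel : Nat) (parent : PySem.Dict String (Option String)) (dist : PySem.Dict String Int)
      (pm : PySem.Dict String (List String)) (q : List String),
      pvInvR victim parent dist pm → (∀ x ∈ q, (pm.get? x).isSome) →
      pvInvR victim (pvBfsA adj fuel (parent, dist, q)).1 (pvBfsA adj fuel (parent, dist, q)).2
        (pvBfsB adj fuel (pm, q)) := by
  intro fuel
  induction fuel with
  | zero => intro parent dist pm q hInv hq; exact hInv
  | succ f ih =>
    intro parent dist pm q hInv hq
    cases q with
    | nil => exact hInv
    | cons u q' =>
      have hu : (pm.get? u).isSome := hq u (by simp)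
      have hq' : ∀ x ∈ q', (pm.get? x).isSome := fun x hx => hq x (by simp [hx])
      obtain ⟨hI, hqeq, hqmem, -⟩ := fold_pres u (pvNbrs adj u) parent dist pm q' hInv hu hq'
      show pvInvR victim (pvBfsA adj f _).1 (pvBfsA adj f _).2 (pvBfsB adj f _)
      have hA : ((pvNbrs adj u).foldl (pvStepA u) (parent, dist, q'))
          = (((pvNbrs adj u).foldl (pvStepA u) (parent, dist, q')).1,
             ((pvNbrs adj u).foldl (pvStepA u) (parent, dist, q')).2.1,
             ((pvNbrs adj u).foldl (pvStepB u) (pm, q')).2) := by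
        rw [← hqeq]
      have hB : ((pvNbrs adj u).foldl (pvStepB u) (pm, q'))
          = (((pvNbrs adj u).foldl (pvStepB u) (pm, q')).1,
             ((pvNbrs adj u).foldl (pvStepB u) (pm, q')).2) := rfl
      rw [hA, hB]
      exact ih _ _ _ _ hI hqmem

theorem final_eq {victim : String} {parent : PySem.Dict String (Option String)}
    {dist : PySem.Dict String Int} {pm : PySem.Dict String (List String)}
    (hInv : pvInvR victim parent dist pm) :
    ∀ (sources : List String) (acc : PySem.Dict String (List String)),
      sources.foldl (fun paths src =>
        match pvPathToRoot parent src with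
        | none => paths
        | some path => if path.getLast? ≠ some victim then paths else paths.insert src path) acc
      = sources.foldl (fun paths src =>
        match pm.get? src with
        | none => paths
        | some path => paths.insert src path) acc := by
  intro sources
  induction sources with
  | nil => intro acc; rfl
  | cons src rest ih =>
    intro acc
    simp only [List.foldl_cons]
    cases hsrc : pm.get? src with
    | none =>
      have hp : (parent.get? src).isSome = false := by
        have := hInv.2.1 src
        simp [hsrc] at this
        simpa using this
      have : pvPathToRoot parent src = none := by
        unfold pvPathToRoot; rw [hp]; rfl
      rw [this]
      exact ih acc
    | some p =>
      have hps : (parent.get? src).isSome := (hInv.2.1 src).mpr (by simp [hsrc])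
      have hlen : p.length ≤ parent.size := by
        rw [hInv.2.2.1]; exact (hInv.2.2.2 src p hsrc).1
      have htr : pvPathToRoot parent src = some p := by
        unfold pvPathToRoot
        rw [if_pos hps, trace_eq hInv parent.size src p [] hsrc hlen]
        simp
      have hlast : p.getLast? = some victim := last_victim hInv p.length p src le_rfl hsrc
      rw [htr]
      simp only [hlast]
      rw [if_neg (by simp)]
      exact ih (acc.insert src p)

-- ===== VERDICT (by name: the statement is the Claim_ definition above) =====
theorem build_paths_to_victim_spec : Claim_equal_build_paths_to_victim := by
  intro adj victim sources _ _
  unfold Spec_build_paths_to_victim build_paths_to_victim build_paths_to_victim_alt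
  by_cases hvic : (PySem.Dict.get? (PySem.Dict.ofList adj) victim).isSome
  · rw [if_pos hvic, if_pos hvic]
    have hInv0 : pvInvR victim
        ((PySem.Dict.empty : PySem.Dict String (Option String)).insert victim none)
        ((PySem.Dict.empty : PySem.Dict String Int).insert victim 0)
        ((PySem.Dict.empty : PySem.Dict String (List String)).insert victim [victim]) := by
      refine ⟨?_, ?_, ?_, ?_⟩
      · intro x
        rw [PySem.Dict.get?_insert, PySem.Dict.get?_insert]
        by_cases hx : x = victim <;> simp [hx, PySem.Dict.get?_empty]
      · intro x
        rw [PySem.Dict.get?_insert, PySem.Dict.get?_insert]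
        by_cases hx : x = victim <;> simp [hx, PySem.Dict.get?_empty]
      · rfl
      · intro x p hx
        rw [PySem.Dict.get?_insert] at hx
        by_cases hxv : x = victim
        · rw [if_pos hxv] at hx
          have hp : p = [victim] := (Option.some.inj hx).symm
          constructor
          · rw [hp]
            show 1 ≤ (PySem.Dict.insert _ victim [victim]).items.length
            rw [PySem.Dict.items_insert_of_not_contains _ _ (PySem.Dict.contains_empty _)]
            simp
          · rw [PySem.Dict.get?_insert, if_pos hxv]
            exact ⟨hxv, by rw [hp, hxv]⟩
        · rw [if_neg hxv, PySem.Dict.get?_empty] at hx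
          cases hx
    have hq0 : ∀ x ∈ [victim],
        (((PySem.Dict.empty : PySem.Dict String (List String)).insert victim [victim]).get? x).isSome := by
      intro x hx
      simp at hx
      rw [hx, PySem.Dict.get?_insert_self]
      rfl
    have hI := bfs_pres adj (pvFuel adj) _ _ _ [victim] hInv0 hq0
    have := final_eq hI sources (PySem.Dict.empty : PySem.Dict String (List String))
    simp only []
    rw [show (pvBfsA adj (pvFuel adj) (_, _, [victim])) =
        ((pvBfsA adj (pvFuel adj) (_, _, [victim])).1, (pvBfsA adj (pvFuel adj) (_, _, [victim])).2) from rfl] at this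
    rw [this]
  · rw [if_neg hvic, if_neg hvic]
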